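-- pv_equiv track=rewrite | github.com/bugtesterdani/C--Installer-without-Admin | pythonsecret/validate_payload.py | normalize_relative_path
-- ===== SOURCE A (Python) =====
-- def normalize_relative_path(path: str) -> str:
--     """
--     Normalize a manifest relative path:
--     - convert "\" to "/"
--     - drop "." segments and empty parts
--     - reject ".." segments
--     """
--     posix = path.replace("\\", "/")
--     parts = []
--     for part in posix.split("/"):
--         if part in ("", "."):
--             continue
--         if part == "..":
--             raise ValueError("Manifest enthält unzulässigen Pfadanteil '..'.")
--         parts.append(part)
--     return "/".join(parts)
-- ===== SOURCE B (Python) =====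
-- def normalize_relative_path(path: str) -> str:
--     """Single left-to-right character scan: '\\' and '/' both end the
--     current segment; segments are flushed into the output as they close."""
--     out = ""
--     seg = ""
--     for ch in path + "/":
--         if ch == "\\" or ch == "/":
--             if seg == "..":
--                 raise ValueError("Manifest enthält unzulässigen Pfadanteil '..'.")
--             if seg != "" and seg != ".":
--                 out = out + "/" + seg if out else seg
--             seg = ""
--         else:
--             seg = seg + ch
--     return out
-- ===== Notes on version B (the rewrite author's own statement) =====
-- stated objective: alternative
-- what changed: B replaces A's replace-then-split-then-filter-then-join pipeline (which builds an intermediate list of segments) by a single left-to-right character scan that treats '\' and '/' uniformly as separators and flushes each segment into the output string as it closes.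
import Mathlib
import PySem

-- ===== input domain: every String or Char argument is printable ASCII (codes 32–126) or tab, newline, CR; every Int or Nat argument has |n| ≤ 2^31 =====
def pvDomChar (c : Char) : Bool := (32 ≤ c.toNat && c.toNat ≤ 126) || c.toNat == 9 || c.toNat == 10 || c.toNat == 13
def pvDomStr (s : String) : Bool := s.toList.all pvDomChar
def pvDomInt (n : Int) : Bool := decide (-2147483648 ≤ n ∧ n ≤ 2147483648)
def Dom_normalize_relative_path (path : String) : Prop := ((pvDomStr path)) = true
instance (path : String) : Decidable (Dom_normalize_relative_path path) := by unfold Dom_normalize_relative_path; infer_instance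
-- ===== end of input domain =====

-- B re-implements A's replace/split/filter/join pipeline as one character scan that
-- flushes segments as they close (alternative decomposition, same cost); proved equal
-- wherever A returns (Pre_ excludes exactly the '..' inputs, where both Pythons raise).

-- ===== PORT A =====
-- strings are ported on their char lists (PySem.Chars), as the prelude prescribes
def normalize_relative_path (path : String) : String :=
  let posix := PySem.Str.replace path "\\" "/"
  let parts := (PySem.Chars.splitOn posix.toList ['/']).foldl
    (fun acc part =>
      if part = [] ∨ part = ['.'] then acc
      else if part = ['.', '.'] then acc   -- Python raises ValueError here; these inputs are excluded by Pre_
      else acc ++ [part]) ([] : List (List Char))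
  String.ofList (PySem.Chars.join ['/'] parts)

-- ===== PORT B =====
-- one step of Source B's loop body: flush on a separator, else extend the current segment
def nrpAltStep (st : List Char × List Char) (ch : Char) : List Char × List Char :=
  if ch = '\\' ∨ ch = '/' then
    if st.2 = ['.', '.'] then (st.1, ([] : List Char))   -- Python raises ValueError here; excluded by Pre_
    else if st.2 ≠ [] ∧ st.2 ≠ ['.'] then
      ((if st.1 ≠ [] then st.1 ++ '/' :: st.2 else st.2), ([] : List Char))
    else (st.1, ([] : List Char))
  else (st.1, st.2 ++ [ch])

def normalize_relative_path_alt (path : String) : String :=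
  -- 'for ch in path + "/"' over the char list; (out, seg) is the loop state
  String.ofList ((path.toList ++ ['/']).foldl nrpAltStep ([], [])).1

-- ===== PRECONDITION & SPEC =====
-- Pre_ excludes exactly the inputs containing a '..' segment, on which Python A raises ValueError.
def Pre_normalize_relative_path (path : String) : Prop :=
  ¬ (['.', '.'] ∈ PySem.Chars.splitOn (PySem.Str.replace path "\\" "/").toList ['/'])
instance (path : String) : Decidable (Pre_normalize_relative_path path) := by
  unfold Pre_normalize_relative_path; infer_instance
def pvWitness_normalize_relative_path : String := "a\\b/./c"

def Spec_normalize_relative_path (path : String) (out : String) : Prop := out = normalize_relative_path_alt path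
instance (path : String) (out : String) : Decidable (Spec_normalize_relative_path path out) := by unfold Spec_normalize_relative_path; infer_instance

-- ===== CLAIM (what is proved, stated in full; the proofs are below) =====
def Claim_equal_normalize_relative_path : Prop := ∀ (path : String), Dom_normalize_relative_path path → Pre_normalize_relative_path path → Spec_normalize_relative_path path (normalize_relative_path path)

-- ===== LEMMAS AND PROOFS =====

-- character rewriting performed by path.replace("\\", "/")
def nrpRep (c : Char) : Char := if c = '\\' then '/' else c

-- reference split on '/' (head-cons form)
def nrpConsHead (x : List Char) : List (List Char) → List (List Char)
  | [] => [x]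
  | h :: t => (x ++ h) :: t

def nrpSplit : List Char → List (List Char)
  | [] => [[]]
  | c :: l => if c = '/' then [] :: nrpSplit l else nrpConsHead [c] (nrpSplit l)

def nrpKeep (p : List Char) : Bool := ¬ (p = [] ∨ p = ['.'] ∨ p = ['.', '.'])

-- reference joining loop (what B's flushes amount to, segment by segment)
def nrpJoin (out : List Char) : List (List Char) → List Char
  | [] => out
  | p :: ps =>
      if nrpKeep p then nrpJoin (if out ≠ [] then out ++ '/' :: p else p) ps
      else nrpJoin out ps

theorem nrpSplit_ne_nil (l : List Char) : nrpSplit l ≠ [] := by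
  cases l with
  | nil => simp [nrpSplit]
  | cons c t =>
    simp only [nrpSplit]
    split
    · simp
    · cases h : nrpSplit t with
      | nil => exact absurd h (nrpSplit_ne_nil t)
      | cons a b => simp [nrpConsHead]

theorem nrpConsHead_consHead (x y : List Char) (l : List (List Char)) :
    nrpConsHead x (nrpConsHead y l) = nrpConsHead (x ++ y) l := by
  cases l <;> simp [nrpConsHead]

theorem nrpConsHead_nil (l : List (List Char)) (h : l ≠ []) : nrpConsHead [] l = l := by
  cases l with
  | nil => exact absurd rfl h
  | cons a b => simp [nrpConsHead]

-- replace with singleton old/new is a character map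
theorem nrpReplace_go (l acc : List Char) (fuel : Nat) (hf : l.length ≤ fuel) :
    PySem.Chars.replace.go ['\\'] ['/'] fuel l acc = acc.reverse ++ l.map nrpRep := by
  induction l generalizing acc fuel with
  | nil => cases fuel <;> simp [PySem.Chars.replace.go]
  | cons c t ih =>
    cases fuel with
    | zero => simp at hf
    | succ f =>
      simp only [PySem.Chars.replace.go]
      by_cases hc : c = '\\'
      · subst hc
        rw [if_pos (by simp [List.isPrefixOf])]
        simp only [List.length_cons, List.length_nil, List.drop_succ_cons,
          List.drop, List.reverse_singleton, List.singleton_append]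
        rw [ih ('/' :: acc) f (by simpa using hf)]
        simp [nrpRep]
      · rw [if_neg (by simp [List.isPrefixOf]; exact fun h => hc h.symm)]
        rw [ih (c :: acc) f (by simpa using hf)]
        simp [nrpRep, hc]

theorem nrpReplace (cs : List Char) :
    PySem.Chars.replace cs ['\\'] ['/'] = cs.map nrpRep := by
  simpa [PySem.Chars.replace] using nrpReplace_go cs [] cs.length le_rfl

-- splitOn with separator "/" computes nrpSplit
theorem nrpSplitOn_go (l cur : List Char) (acc : List (List Char)) (fuel : Nat)
    (hf : l.length ≤ fuel) :
    PySem.Chars.splitOn.go ['/'] fuel l cur acc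
      = acc.reverse ++ nrpConsHead cur.reverse (nrpSplit l) := by
  induction l generalizing cur acc fuel with
  | nil => cases fuel <;> simp [PySem.Chars.splitOn.go, nrpSplit, nrpConsHead]
  | cons c t ih =>
    cases fuel with
    | zero => simp at hf
    | succ f =>
      simp only [PySem.Chars.splitOn.go]
      by_cases hc : c = '/'
      · subst hc
        rw [if_pos (by simp [List.isPrefixOf])]
        simp only [List.length_cons, List.length_nil, List.drop_succ_cons, List.drop]
        rw [ih [] (cur.reverse :: acc) f (by simpa using hf)]
        rw [List.reverse_nil, nrpConsHead_nil _ (nrpSplit_ne_nil t)]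
        simp [nrpSplit, nrpConsHead]
      · rw [if_neg (by simp [List.isPrefixOf]; exact fun h => hc h.symm)]
        rw [ih (c :: cur) acc f (by simpa using hf)]
        simp [nrpSplit, hc, nrpConsHead_consHead]

theorem nrpSplitOn (cs : List Char) :
    PySem.Chars.splitOn cs ['/'] = nrpSplit cs := by
  have := nrpSplitOn_go cs [] [] (cs.length + 1) (by omega)
  simpa [PySem.Chars.splitOn, nrpConsHead_nil _ (nrpSplit_ne_nil cs)] using this

-- A's accumulating loop is a filter
theorem nrpFoldFilter (parts : List (List Char)) (acc : List (List Char)) :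
    parts.foldl
      (fun acc part =>
        if part = [] ∨ part = ['.'] then acc
        else if part = ['.', '.'] then acc
        else acc ++ [part]) acc
      = acc ++ parts.filter nrpKeep := by
  induction parts generalizing acc with
  | nil => simp
  | cons p ps ih =>
    simp only [List.foldl_cons, List.filter_cons]
    by_cases h1 : p = [] ∨ p = ['.']
    · rw [if_pos h1, ih]
      have : nrpKeep p = false := by simp [nrpKeep]; tauto
      simp [this]
    · rw [if_neg h1]
      by_cases h2 : p = ['.', '.']
      · rw [if_pos h2, ih]
        have : nrpKeep p = false := by simp [nrpKeep]; tauto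
        simp [this]
      · rw [if_neg h2, ih]
        have : nrpKeep p = true := by simp [nrpKeep]; tauto
        simp [this]

-- joining the kept parts: nrpJoin from a nonempty accumulator appends
theorem nrpJoin_of_ne_nil (parts : List (List Char)) (out : List Char) (h : out ≠ []) :
    nrpJoin out parts = out ++ (parts.filter nrpKeep).flatMap (fun p => '/' :: p) := by
  induction parts generalizing out with
  | nil => simp [nrpJoin]
  | cons p ps ih =>
    simp only [nrpJoin, List.filter_cons]
    by_cases hk : nrpKeep p = true
    · rw [if_pos hk, if_pos h, ih _ (by simp [h]), hk]
      simp
    · rw [if_neg hk, ih _ h, if_neg hk]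

theorem nrpJoin_nil_eq (parts : List (List Char)) :
    nrpJoin [] parts = PySem.Chars.join ['/'] (parts.filter nrpKeep) := by
  induction parts with
  | nil => simp [nrpJoin, PySem.Chars.join, List.intercalate]
  | cons p ps ih =>
    simp only [nrpJoin, List.filter_cons]
    by_cases hk : nrpKeep p = true
    · rw [if_pos hk, if_neg (by simp), hk]
      have hp : p ≠ [] := by
        intro h; rw [h] at hk; simp [nrpKeep] at hk
      rw [nrpJoin_of_ne_nil _ _ hp]
      -- intercalate ['/'] (p :: kept) = p ++ kept.flatMap ('/'::·)
      induction (ps.filter nrpKeep) with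
      | nil => simp [PySem.Chars.join, List.intercalate]
      | cons q qs ihq =>
        simp [PySem.Chars.join, List.intercalate] at ihq ⊢
        cases qs <;> simp_all [List.intersperse]
    · rw [if_neg hk, ih, if_neg hk]

-- B's machine computes nrpJoin over the (head-patched) split of the rewritten chars
theorem nrpMachine (cs : List Char) (out seg : List Char) :
    ((cs ++ ['/']).foldl nrpAltStep (out, seg)).1
      = nrpJoin out (nrpConsHead seg (nrpSplit (cs.map nrpRep))) := by
  induction cs generalizing out seg with
  | nil =>
    simp only [List.nil_append, List.foldl_cons, List.foldl_nil, List.map_nil, nrpSplit,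
      nrpConsHead, List.append_nil, nrpJoin, nrpAltStep]
    by_cases h2 : seg = ['.', '.']
    · simp [h2, nrpKeep]
    · by_cases h3 : seg ≠ [] ∧ seg ≠ ['.']
      · have : nrpKeep seg = true := by simp [nrpKeep]; tauto
        simp [h2, h3, this]
      · have : nrpKeep seg = false := by simp [nrpKeep]; tauto
        simp [h2, h3, this]
  | cons c t ih =>
    simp only [List.cons_append, List.foldl_cons, List.map_cons]
    by_cases hc : c = '\\' ∨ c = '/'
    · have hrep : nrpRep c = '/' := by
        rcases hc with h | h <;> simp [nrpRep, h]
      have hstep : nrpAltStep (out, seg) c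
          = (nrpJoin out [seg], ([] : List Char)) := by
        simp only [nrpAltStep, if_pos hc]
        by_cases h2 : seg = ['.', '.']
        · simp [h2, nrpJoin, nrpKeep]
        · by_cases h3 : seg ≠ [] ∧ seg ≠ ['.']
          · have : nrpKeep seg = true := by simp [nrpKeep]; tauto
            simp [h2, h3, nrpJoin, this]
          · have : nrpKeep seg = false := by simp [nrpKeep]; tauto
            simp [h2, h3, nrpJoin, this]
      rw [hstep, ih]
      rw [hrep]
      simp only [nrpSplit]
      rw [nrpConsHead_nil _ (nrpSplit_ne_nil _)]
      -- nrpJoin (nrpJoin out [seg]) X = nrpJoin out (seg :: X)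
      simp only [nrpConsHead, nrpJoin]
      by_cases hk : nrpKeep seg = true <;> simp [hk, nrpJoin]
    · have hrep : nrpRep c = c := by
        simp [nrpRep]; intro h; exact absurd (Or.inl h) hc
      have hstep : nrpAltStep (out, seg) c = (out, seg ++ [c]) := by
        simp [nrpAltStep, hc]
      rw [hstep, ih, hrep]
      have hcslash : c ≠ '/' := fun h => hc (Or.inr h)
      simp only [nrpSplit, if_neg hcslash]
      rw [nrpConsHead_consHead]

-- ===== VERDICT (by name: the statement is the Claim_ definition above) =====
theorem normalize_relative_path_spec : Claim_equal_normalize_relative_path := by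
  intro path _ _
  have hrepl : (PySem.Str.replace path "\\" "/").toList = path.toList.map nrpRep := by
    rw [PySem.Str.toList_replace]
    simpa using nrpReplace path.toList
  simp only [Spec_normalize_relative_path, normalize_relative_path, normalize_relative_path_alt]
  rw [nrpMachine path.toList [] [], nrpConsHead_nil _ (nrpSplit_ne_nil _), nrpJoin_nil_eq,
      hrepl, nrpSplitOn, nrpFoldFilter, List.nil_append]
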